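-- pv_equiv track=rewrite | github.com/kermitnirmit/Wordle-Solver | solver.py | getWordsWithLetters
-- ===== SOURCE A (Python) =====
-- def getWordsWithLetters(wordlist, letters):
--     nlist = []
--     for word in wordlist:
--         if len(letters & set(word)) > 0:
--             nlist.append(word)
--
--     def score(w):
--         return len(set(w) & letters)
--     nlist.sort(key= lambda x: score(x), reverse=True)
--     return nlist
-- ===== SOURCE B (Python) =====
-- def getWordsWithLetters(wordlist, letters):
--     # Distribution into score buckets instead of filter + comparison sort:
--     # each word's score is computed once; buckets are emitted from high score to low.
--     buckets = {}
--     for w in wordlist: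
--         s = len(set(w) & letters)
--         if s > 0:
--             buckets.setdefault(s, []).append(w)
--     result = []
--     for s in range(len(letters), 0, -1):
--         result += buckets.get(s, [])
--     return result
-- ===== Notes on version B (the rewrite author's own statement) =====
-- stated objective: alternative
-- what changed: Replaced filter-then-stable-comparison-sort with a distribution (counting) sort: each word's shared-letter score is computed once into dict buckets, which are emitted from score len(letters) down to 1; score-0 words never enter a bucket, and input order within a bucket reproduces sort stability.
import Mathlib
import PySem

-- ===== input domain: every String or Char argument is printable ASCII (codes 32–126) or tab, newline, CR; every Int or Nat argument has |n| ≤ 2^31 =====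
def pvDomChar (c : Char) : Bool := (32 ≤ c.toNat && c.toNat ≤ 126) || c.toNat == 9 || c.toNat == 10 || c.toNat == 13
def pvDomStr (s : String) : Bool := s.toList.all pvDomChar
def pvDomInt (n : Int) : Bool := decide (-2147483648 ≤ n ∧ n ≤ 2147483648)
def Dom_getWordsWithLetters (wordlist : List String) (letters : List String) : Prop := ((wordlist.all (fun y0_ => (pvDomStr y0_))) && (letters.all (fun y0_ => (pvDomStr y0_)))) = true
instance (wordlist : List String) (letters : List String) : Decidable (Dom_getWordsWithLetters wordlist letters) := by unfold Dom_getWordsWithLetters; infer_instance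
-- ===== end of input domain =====

-- B replaces A's filter + stable comparison sort by a counting sort: score each word once
-- into dict buckets, emit buckets from high score to low (objective: alternative algorithm).

-- set(word): the word's characters as 1-character strings, first occurrences in order
def pvChars (w : String) : List String := PySem.Set.ofList (w.toList.map (fun c => String.ofList [c]))

-- ===== PORT A =====
def getWordsWithLetters (wordlist : List String) (letters : List String) : List String :=
  let nlist := wordlist.foldl (fun nlist word =>
    if 0 < (PySem.Set.inter letters (pvChars word)).len then nlist ++ [word] else nlist) []
  PySem.List.sorted nlist (fun x => (PySem.Set.inter (pvChars x) letters).len) true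

-- ===== PORT B =====
def getWordsWithLetters_alt (wordlist : List String) (letters : List String) : List String :=
  let buckets := wordlist.foldl (fun buckets w =>
    let s := (PySem.Set.inter (pvChars w) letters).len
    if 0 < s then buckets.insert s (buckets.getD s [] ++ [w]) else buckets)
    (PySem.Dict.empty : PySem.Dict Int (List String))
  (PySem.List.pyRange (letters.length : Int) 0 (-1)).foldl
    (fun result s => result ++ buckets.getD s []) []

-- ===== PRECONDITION & SPEC =====
def Spec_getWordsWithLetters (wordlist : List String) (letters : List String) (out : List String) : Prop := out = getWordsWithLetters_alt wordlist letters
instance (wordlist : List String) (letters : List String) (out : List String) : Decidable (Spec_getWordsWithLetters wordlist letters out) := by unfold Spec_getWordsWithLetters; infer_instance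

-- ===== CLAIM (what is proved, stated in full; the proofs are below) =====
def Claim_equal_getWordsWithLetters : Prop := ∀ (wordlist : List String) (letters : List String), Dom_getWordsWithLetters wordlist letters → Spec_getWordsWithLetters wordlist letters (getWordsWithLetters wordlist letters)

-- ===== LEMMAS AND PROOFS =====

-- the shared-letter score of a word
def pvScore (letters : List String) (w : String) : Int :=
  (PySem.Set.inter (pvChars w) letters).len

theorem pvLevels_eq (letters : List String) :
    PySem.List.pyRange (letters.length : Int) 0 (-1)
      = (List.range letters.length).map (fun j : Nat => (letters.length : Int) - (j : Int)) := by
  unfold PySem.List.pyRange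
  simp only [if_neg (by norm_num : ¬((-1:Int) = 0)), if_neg (by norm_num : ¬((0:Int) < -1))]
  rcases Nat.eq_zero_or_pos letters.length with h | h
  · simp [h]
  · rw [if_pos (by exact_mod_cast h : (0:Int) < letters.length)]
    have : (((letters.length:Int) - 0 + - -1 - 1) / -(-1)).toNat = letters.length := by
      norm_num
    rw [this]
    apply List.map_congr_left
    intro j hj
    ring

theorem mem_pvLevels (letters : List String) (k : Int) :
    k ∈ PySem.List.pyRange (letters.length : Int) 0 (-1) ↔ 1 ≤ k ∧ k ≤ (letters.length : Int) := by
  rw [pvLevels_eq]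
  simp only [List.mem_map, List.mem_range]
  constructor
  · rintro ⟨j, hj, rfl⟩; omega
  · rintro ⟨h1, h2⟩
    refine ⟨((letters.length : Int) - k).toNat, by omega, by omega⟩

theorem pvLevels_pairwise (letters : List String) :
    (PySem.List.pyRange (letters.length : Int) 0 (-1)).Pairwise (· > ·) := by
  rw [pvLevels_eq]
  refine List.Pairwise.map _ (fun a b h => ?_) List.pairwise_lt_range
  simp only [gt_iff_lt]
  omega

theorem filter_pos_iff {α : Type} (p : α → Bool) (l : List α) :
    0 < ((List.filter p l).length : Int) ↔ ∃ a ∈ l, p a = true := by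
  rw [Int.natCast_pos, List.length_pos_iff, ← List.isEmpty_eq_false_iff]
  simp [List.filter_eq_nil_iff]

-- positivity of the two intersection orders agrees
theorem pvPos_iff (letters : List String) (w : String) :
    (0 < (PySem.Set.inter letters (pvChars w)).len) ↔ 0 < pvScore letters w := by
  simp only [pvScore, PySem.Set.inter, PySem.Set.len, filter_pos_iff, PySem.Set.contains,
    List.contains_iff_mem]
  constructor
  · rintro ⟨a, ha, hb⟩; exact ⟨a, hb, ha⟩
  · rintro ⟨a, ha, hb⟩; exact ⟨a, hb, ha⟩

-- the score never exceeds the number of letters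
theorem pvScore_le (letters : List String) (w : String) :
    pvScore letters w ≤ (letters.length : Int) := by
  simp only [pvScore, PySem.Set.inter, PySem.Set.len, Int.ofNat_le]
  have hnd : (List.filter (fun x => (PySem.Set.contains letters x)) (pvChars w)).Nodup :=
    (PySem.Set.nodup_ofList _).filter _
  have hsub : (List.filter (fun x => (PySem.Set.contains letters x)) (pvChars w)) ⊆ letters := by
    intro x hx
    have := List.of_mem_filter hx
    simpa [PySem.Set.contains, List.contains_iff_mem] using this
  exact_mod_cast (hnd.subperm hsub).length_le

-- insertBy walks past a block it does not go before
theorem insertBy_append_not_before {α : Type} (before : α → α → Bool) (x : α)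
    (zs ys : List α) (h : ∀ y ∈ zs, before x y = false) :
    PySem.List.insertBy before x (zs ++ ys) = zs ++ PySem.List.insertBy before x ys := by
  induction zs with
  | nil => rfl
  | cons z zs ih =>
    simp only [List.cons_append, PySem.List.insertBy, h z (by simp)]
    simp only [Bool.false_eq_true, if_false, List.cons.injEq, true_and]
    exact ih (fun y hy => h y (by simp [hy]))

theorem insertBy_all_before {α : Type} (before : α → α → Bool) (x : α)
    (ys : List α) (h : ∀ y ∈ ys, before x y = true) :
    PySem.List.insertBy before x ys = x :: ys := by
  cases ys with
  | nil => rfl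
  | cons y ys => simp [PySem.List.insertBy, h y (by simp)]

-- inserting into a descending bucket concatenation lands at the end of x's bucket
theorem insertBy_flatMap {α : Type} (key : α → Int) (x : α) (D : List Int) (f : Int → List α)
    (hD : D.Pairwise (· > ·)) (hx : key x ∈ D)
    (hf : ∀ s ∈ D, ∀ w ∈ f s, key w = s) :
    PySem.List.insertBy (fun a b => decide (key b < key a)) x (D.flatMap f)
      = D.flatMap (fun s => f s ++ if key x = s then [x] else []) := by
  induction D with
  | nil => simp at hx
  | cons s D ih =>
    have hpw := (List.pairwise_cons.mp hD).1
    have htail := (List.pairwise_cons.mp hD).2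
    by_cases hks : key x = s
    · have htlt : ∀ y ∈ D.flatMap f, key y < key x := by
        intro y hy
        obtain ⟨s', hs', hy'⟩ := List.mem_flatMap.mp hy
        rw [hf s' (by simp [hs']) y hy', hks]
        exact hpw s' hs'
      rw [List.flatMap_cons, insertBy_append_not_before _ _ _ _
        (fun y hy => by
          simp only [decide_eq_false_iff_not, not_lt]
          exact le_of_eq (by rw [hks, hf s (by simp) y hy])),
        insertBy_all_before _ _ _ (fun y hy => by simp [htlt y hy])]
      rw [List.flatMap_cons, if_pos hks]
      have heq : (D.flatMap fun s' => f s' ++ if key x = s' then [x] else []) = D.flatMap f := by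
        apply List.flatMap_congr
        intro s' hs'
        rw [if_neg (by have := hpw s' hs'; omega), List.append_nil]
      rw [heq]
      simp
    · have hkD : key x ∈ D := by rcases List.mem_cons.mp hx with h | h; exact absurd h hks; exact h
      have hslt : key x < s := hpw _ hkD
      rw [List.flatMap_cons, insertBy_append_not_before _ _ _ _
        (fun y hy => by
          simp only [decide_eq_false_iff_not, not_lt]
          exact le_of_lt ((hf s (by simp) y hy) ▸ hslt)),
        ih htail hkD (fun s' hs' w hw => hf s' (by simp [hs']) w hw),
        List.flatMap_cons, if_neg hks]
      simp

-- stable reverse sort of a list whose keys all lie in a strictly descending D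
theorem sorted_rev_eq_flatMap {α : Type} (key : α → Int) (D : List Int)
    (hD : D.Pairwise (· > ·)) :
    ∀ (l : List α), (∀ w ∈ l, key w ∈ D) →
      PySem.List.sorted l key true = D.flatMap (fun s => l.filter (fun w => key w = s)) := by
  intro l
  induction l using List.reverseRecOn with
  | nil =>
    intro _
    simp [PySem.List.sorted]
  | append_singleton l x ih =>
    intro hmem
    rw [PySem.List.sorted_rev_eq_foldl_insertBy, List.foldl_append, List.foldl_cons, List.foldl_nil,
      ← PySem.List.sorted_rev_eq_foldl_insertBy, ih (fun w hw => hmem w (by simp [hw])),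
      insertBy_flatMap key x D _ hD (hmem x (by simp))
        (fun s hs w hw => of_decide_eq_true (List.mem_filter.mp hw).2)]
    apply List.flatMap_congr
    intro s hs
    rw [List.filter_append]
    congr 1
    simp only [List.filter_cons, List.filter_nil]
    by_cases h : key x = s
    · simp [h]
    · simp [h]

-- each bucket holds exactly the words of its score, in input order
theorem bucketD (letters : List String) (l : List String) (s : Int) (hs : 0 < s) :
    (l.foldl (fun buckets w =>
        let s := (PySem.Set.inter (pvChars w) letters).len
        if 0 < s then buckets.insert s (buckets.getD s [] ++ [w]) else buckets)
      (PySem.Dict.empty : PySem.Dict Int (List String))).getD s []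
    = l.filter (fun w => pvScore letters w = s) := by
  induction l using List.reverseRecOn with
  | nil => simp [PySem.Dict.empty, PySem.Dict.getD, PySem.Dict.get?]
  | append_singleton l w ih =>
    rw [List.foldl_append, List.foldl_cons, List.foldl_nil, List.filter_append]
    simp only [] at ih ⊢
    by_cases hw : 0 < (PySem.Set.inter (pvChars w) letters).len
    · rw [if_pos hw, PySem.Dict.getD_insert]
      by_cases hsw : s = (PySem.Set.inter (pvChars w) letters).len
      · rw [if_pos hsw, ← hsw, ih]
        have h2 : pvScore letters w = s := hsw.symm
        simp [h2]
      · rw [if_neg hsw, ih]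
        have h2 : ¬ (pvScore letters w = s) := fun h => hsw h.symm
        simp [h2]
    · rw [if_neg hw]
      have h0 : pvScore letters w ≤ 0 := not_lt.mp hw
      have h2 : ¬ (pvScore letters w = s) := by omega
      rw [ih]
      simp [h2]

-- B is the level-by-level bucket concatenation
theorem B_eq (wordlist letters : List String) :
    getWordsWithLetters_alt wordlist letters
      = (PySem.List.pyRange (letters.length : Int) 0 (-1)).flatMap
          (fun s => wordlist.filter (fun w => pvScore letters w = s)) := by
  simp only [getWordsWithLetters_alt]
  rw [PySem.List.foldl_append_eq_flatMap, List.nil_append]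
  apply List.flatMap_congr
  intro s hs
  exact bucketD letters wordlist s (by have := (mem_pvLevels letters s).mp hs; omega)

-- A is the same bucket concatenation
theorem A_eq (wordlist letters : List String) :
    getWordsWithLetters wordlist letters
      = (PySem.List.pyRange (letters.length : Int) 0 (-1)).flatMap
          (fun s => wordlist.filter (fun w => pvScore letters w = s)) := by
  simp only [getWordsWithLetters]
  rw [show (fun (nlist : List String) (word : String) =>
        if 0 < (PySem.Set.inter letters (pvChars word)).len then nlist ++ [word] else nlist)
      = (fun nlist word => if (decide (0 < (PySem.Set.inter letters (pvChars word)).len)) = true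
          then nlist ++ [id word] else nlist) by
      funext nlist word; split_ifs <;> simp_all]
  rw [PySem.List.foldl_append_if, List.map_id, List.nil_append]
  rw [sorted_rev_eq_flatMap (fun x => (PySem.Set.inter (pvChars x) letters).len) _
    (pvLevels_pairwise letters) _ ?hmem]
  case hmem =>
    intro w hw
    have h := List.mem_filter.mp hw
    have hpos : 0 < pvScore letters w := (pvPos_iff letters w).mp (of_decide_eq_true h.2)
    exact (mem_pvLevels letters _).mpr ⟨by exact hpos, pvScore_le letters w⟩
  apply List.flatMap_congr
  intro s hs
  have hs1 : 1 ≤ s := ((mem_pvLevels letters s).mp hs).1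
  rw [List.filter_filter]
  apply List.filter_congr
  intro w hw
  by_cases h : pvScore letters w = s
  · have hthis : 0 < (PySem.Set.inter letters (pvChars w)).len :=
      (pvPos_iff letters w).mpr (by omega)
    simp [PySem.Set.len] at hthis
    simp [pvScore] at h ⊢
    simp [h, hthis]
  · simp [pvScore] at h ⊢
    simp [h]

-- ===== VERDICT (by name: the statement is the Claim_ definition above) =====
theorem getWordsWithLetters_spec : Claim_equal_getWordsWithLetters := by
  intro wordlist letters _
  unfold Spec_getWordsWithLetters
  rw [A_eq, B_eq]
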